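-- pv_equiv track=rewrite | github.com/UGeunJi/Coding_Test_Practice | Coding Basic Training/접미사 배열.py | solution
-- ===== SOURCE A (Python) =====
-- def solution(my_string):
--     answer = []
--     my_string = list(my_string)
--
--     for i in range(len(my_string)):
--         answer.append(''.join(my_string))
--         my_string.pop(0)
--
--     answer.sort()
--
--     return answer
-- ===== SOURCE B (Python) =====
-- def solution(my_string):
--     # Build the suffixes shortest-to-longest by prepending one character at a
--     # time, and keep the result sorted throughout by inserting each new suffix
--     # at its binary-search position (no separate sort pass).
--     result = []
--     suffix = ''
--     for ch in reversed(my_string):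
--         suffix = ch + suffix
--         lo, hi = 0, len(result)
--         while lo < hi:
--             mid = (lo + hi) // 2
--             if result[mid] < suffix:
--                 lo = mid + 1
--             else:
--                 hi = mid
--         result.insert(lo, suffix)
--     return result
-- ===== Notes on version B (the rewrite author's own statement) =====
-- stated objective: alternative
-- what changed: Instead of rebuilding each suffix by joining the remaining characters after popping the front and then sorting the whole list at the end, B builds the suffixes shortest-to-longest by prepending one character and maintains the output sorted incrementally, inserting each new suffix at its binary-search position.
import Mathlib
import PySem

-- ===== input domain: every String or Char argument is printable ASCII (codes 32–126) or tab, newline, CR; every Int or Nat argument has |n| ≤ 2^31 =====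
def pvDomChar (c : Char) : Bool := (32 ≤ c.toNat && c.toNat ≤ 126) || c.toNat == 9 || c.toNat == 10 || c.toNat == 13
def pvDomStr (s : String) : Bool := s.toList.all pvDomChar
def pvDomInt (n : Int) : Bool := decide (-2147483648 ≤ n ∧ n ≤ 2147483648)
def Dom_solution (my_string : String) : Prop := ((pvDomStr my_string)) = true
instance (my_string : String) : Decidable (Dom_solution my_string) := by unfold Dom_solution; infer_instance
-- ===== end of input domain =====

-- B replaces A's "pop the front, re-join each suffix, then sort" by building the
-- suffixes shortest-to-longest and keeping the output sorted throughout via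
-- binary-search insertion (objective: alternative single-pass algorithm).

-- ===== PORT A =====
-- A: answer = []; my_string = list(my_string); for i in range(len(my_string)):
--    append the join of my_string; my_string.pop(0); answer.sort().
-- The empty-separator join over a list of single characters is String.ofList of the char
-- list; list.pop(0) is PySem.List.pop? at index 0 (never none here: the list has
-- len - i > 0 elements at step i); answer.sort() is PySem.List.sorted with the
-- identity key.
def solution (my_string : String) : List String :=
  let st := (PySem.List.pyRange 0 (PySem.List.len my_string.toList) 1).foldl
    (fun (s : List String × List Char) _ =>
      (s.1 ++ [String.ofList s.2], ((PySem.List.pop? s.2 0).map (·.2)).getD []))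
    ([], my_string.toList)
  PySem.List.sorted st.1 (fun x => x) false

-- ===== PORT B =====
-- Source B's inner while loop (binary search for the insertion point). lo, hi, mid
-- are nonnegative throughout, so their Nat values mirror the Python ints exactly:
-- (lo + hi) // 2 on nonnegatives is Nat division, and result[mid] with
-- 0 ≤ mid < len(result) is List.getD mid (both exact here).
def bisectLoop (res : List String) (s : String) (lo hi : Nat) : Nat :=
  if _h : lo < hi then
    let mid := (lo + hi) / 2
    if res.getD mid "" < s then bisectLoop res s (mid + 1) hi
    else bisectLoop res s lo mid
  else lo
termination_by hi - lo
decreasing_by all_goals omega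

-- Source B's for loop over reversed(my_string): suffix = ch + suffix (a char list,
-- cons), then result.insert(lo, suffix) with lo from the binary search.
def solution_alt (my_string : String) : List String :=
  (my_string.toList.reverse.foldl
    (fun (p : List Char × List String) ch =>
      let suf := ch :: p.1
      let s := String.ofList suf
      (suf, PySem.List.insert p.2 ((bisectLoop p.2 s 0 p.2.length : Nat) : Int) s))
    ([], [])).2

-- ===== PRECONDITION & SPEC =====
def Spec_solution (my_string : String) (out : List String) : Prop := out = solution_alt my_string
instance (my_string : String) (out : List String) : Decidable (Spec_solution my_string out) := by unfold Spec_solution; infer_instance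

-- ===== CLAIM (what is proved, stated in full; the proofs are below) =====
def Claim_equal_solution : Prop := ∀ (my_string : String), Dom_solution my_string → Spec_solution my_string (solution my_string)

-- ===== LEMMAS AND PROOFS =====

-- The strings B inserts while folding over rs with accumulated prefix p.
def sufs : List Char → List Char → List String
  | [], _ => []
  | c :: rest, p => String.ofList (c :: p) :: sufs rest (c :: p)

-- One insertion step of B, named for the lemmas.
def insAt (res : List String) (s : String) : List String :=
  PySem.List.insert res ((bisectLoop res s 0 res.length : Nat) : Int) s

-- Binary-search invariant: on a sorted res, bisectLoop returns a split point —
-- everything strictly below s lies before it, nothing below s lies at or after it.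
lemma bisect_main (res : List String) (s : String) (hres : res.Pairwise (· ≤ ·)) :
    ∀ (n lo hi : Nat), hi - lo = n → lo ≤ hi → hi ≤ res.length →
    (∀ i, i < lo → res.getD i "" < s) →
    (∀ i, hi ≤ i → i < res.length → ¬ res.getD i "" < s) →
    bisectLoop res s lo hi ≤ res.length ∧
    (∀ i, i < bisectLoop res s lo hi → res.getD i "" < s) ∧
    (∀ i, bisectLoop res s lo hi ≤ i → i < res.length → ¬ res.getD i "" < s) := by
  intro n
  induction n using Nat.strong_induction_on with
  | _ n IH =>
    intro lo hi hn hlh hhl hlow hhigh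
    rw [bisectLoop]
    by_cases h : lo < hi
    · simp only [h, dif_pos]
      set mid := (lo + hi) / 2 with hmid
      have hm1 : lo ≤ mid := by omega
      have hm2 : mid < hi := by omega
      by_cases hc : res.getD mid "" < s
      · simp only [hc, if_pos]
        refine IH (hi - (mid + 1)) (by omega) (mid + 1) hi rfl (by omega) hhl ?_ hhigh
        intro i hi'
        have him : i < res.length := by omega
        rw [List.getD_eq_getElem res "" him]
        rcases Nat.lt_or_ge i mid with hlt | hge
        · have := List.pairwise_iff_getElem.mp hres i mid him (by omega) hlt
          calc res[i] ≤ res[mid] := this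
            _ < s := by rwa [List.getD_eq_getElem res "" (by omega)] at hc
        · have : i = mid := by omega
          subst this
          rwa [List.getD_eq_getElem res "" him] at hc
      · simp only [hc, if_false]
        refine IH (mid - lo) (by omega) lo mid rfl (by omega) (by omega) hlow ?_
        intro i hmi hil hlt
        rcases Nat.lt_or_ge i mid with h' | h'
        · omega
        rcases Nat.eq_or_lt_of_le h' with h'' | h''
        · exact hc (h'' ▸ hlt)
        · have hmlen : mid < res.length := by omega
          have := List.pairwise_iff_getElem.mp hres mid i hmlen hil h''
          apply hc
          rw [List.getD_eq_getElem res "" hmlen]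
          rw [List.getD_eq_getElem res "" hil] at hlt
          exact lt_of_le_of_lt this hlt
    · rw [dif_neg h]
      exact ⟨by omega, fun i hi' => hlow i hi', fun i h1 h2 => hhigh i (by omega) h2⟩

lemma bisect_props (res : List String) (s : String) (hres : res.Pairwise (· ≤ ·)) :
    bisectLoop res s 0 res.length ≤ res.length ∧
    (∀ i, i < bisectLoop res s 0 res.length → res.getD i "" < s) ∧
    (∀ i, bisectLoop res s 0 res.length ≤ i → i < res.length → ¬ res.getD i "" < s) :=
  bisect_main res s hres _ 0 res.length rfl (by omega) le_rfl (by omega) (by omega)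

-- Python's list.insert(n, v) for 0 ≤ n ≤ len is take/cons/drop.
lemma insert_nat {α : Type} (xs : List α) (n : Nat) (v : α) (h : n ≤ xs.length) :
    PySem.List.insert xs (n : Int) v = xs.take n ++ v :: xs.drop n := by
  have e : ((if (n:Int) < 0 then max ((n:Int) + (xs.length:Int)) 0 else min (n:Int) (xs.length:Int))).toNat = n := by
    split_ifs with h1 <;> omega
  simp only [PySem.List.insert, PySem.List.sliceIndices]
  norm_num
  rw [e]

lemma insAt_eq (res : List String) (s : String) (hres : res.Pairwise (· ≤ ·)) :
    insAt res s = res.take (bisectLoop res s 0 res.length) ++ s :: res.drop (bisectLoop res s 0 res.length) :=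
  insert_nat res _ s (bisect_props res s hres).1

lemma insAt_perm (res : List String) (s : String) (hres : res.Pairwise (· ≤ ·)) :
    (insAt res s).Perm (s :: res) := by
  rw [insAt_eq res s hres]
  calc (res.take _ ++ s :: res.drop _).Perm (s :: (res.take _ ++ res.drop _)) := List.perm_middle
    _ = s :: res := by rw [List.take_append_drop]

lemma insAt_sorted (res : List String) (s : String) (hres : res.Pairwise (· ≤ ·)) :
    (insAt res s).Pairwise (· ≤ ·) := by
  rw [insAt_eq res s hres]
  obtain ⟨hle, hlt, hge⟩ := bisect_props res s hres
  set k := bisectLoop res s 0 res.length with hk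
  have hcross := (List.pairwise_append.mp (by rw [List.take_append_drop k res]; exact hres)).2.2
  have htk : ∀ a ∈ res.take k, a < s := by
    intro a ha
    obtain ⟨i, hilen, hieq⟩ := List.mem_iff_getElem.mp ha
    have hi2 : i < k := by have := hilen; simp [List.length_take] at this; omega
    have hi3 : i < res.length := by have := hilen; simp [List.length_take] at this; omega
    rw [← hieq, List.getElem_take]
    have := hlt i hi2
    rwa [List.getD_eq_getElem res "" hi3] at this
  have hdk : ∀ b ∈ res.drop k, s ≤ b := by
    intro b hb
    obtain ⟨i, hilen, hieq⟩ := List.mem_iff_getElem.mp hb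
    have hi3 : k + i < res.length := by have := hilen; simp [List.length_drop] at this; omega
    rw [← hieq, List.getElem_drop]
    have := hge (k + i) (by omega) hi3
    rw [List.getD_eq_getElem res "" hi3] at this
    exact le_of_not_gt this
  refine List.pairwise_append.mpr ⟨List.Pairwise.sublist (List.take_sublist k res) hres, ?_, ?_⟩
  · exact List.pairwise_cons.mpr ⟨hdk, List.Pairwise.sublist (List.drop_sublist k res) hres⟩
  · intro a ha b hb
    rcases List.mem_cons.mp hb with rfl | hb'
    · exact le_of_lt (htk a ha)
    · exact hcross a ha b hb'

-- B's loop invariant: starting from a sorted out, the result is a sorted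
-- permutation of the inserted suffixes sufs rs p followed by out.
lemma Bloop (rs : List Char) : ∀ (p : List Char) (out : List String), out.Pairwise (· ≤ ·) →
    ((rs.foldl (fun (q : List Char × List String) ch =>
        let suf := ch :: q.1
        let s := String.ofList suf
        (suf, PySem.List.insert q.2 ((bisectLoop q.2 s 0 q.2.length : Nat) : Int) s)) (p, out)).2).Perm (sufs rs p ++ out)
    ∧ ((rs.foldl (fun (q : List Char × List String) ch =>
        let suf := ch :: q.1
        let s := String.ofList suf
        (suf, PySem.List.insert q.2 ((bisectLoop q.2 s 0 q.2.length : Nat) : Int) s)) (p, out)).2).Pairwise (· ≤ ·) := by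
  induction rs with
  | nil =>
    intro p out hout
    simp only [List.foldl_nil, sufs, List.nil_append]
    exact ⟨List.Perm.refl out, hout⟩
  | cons c rest ih =>
    intro p out hout
    simp only [List.foldl_cons]
    rw [show PySem.List.insert out (((bisectLoop out (String.ofList (c :: p)) 0 out.length : Nat)) : Int)
          (String.ofList (c :: p)) = insAt out (String.ofList (c :: p)) from rfl]
    obtain ⟨hperm, hsort⟩ := ih (c :: p) (insAt out (String.ofList (c :: p)))
      (insAt_sorted out _ hout)
    exact ⟨hperm.trans ((List.Perm.append_left _ (insAt_perm out _ hout)).trans List.perm_middle), hsort⟩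

lemma sufs_append (xs ys p : List Char) :
    sufs (xs ++ ys) p = sufs xs p ++ sufs ys (xs.reverse ++ p) := by
  induction xs generalizing p with
  | nil => simp [sufs]
  | cons x xs ih => simp [sufs, ih (x :: p)]

-- The suffixes B inserts (over the reversed string) are a permutation of the
-- suffix list A builds.
lemma sufs_rev_perm (l : List Char) :
    (sufs l.reverse []).Perm ((List.range l.length).map (fun i => String.ofList (l.drop i))) := by
  induction l with
  | nil => simp [sufs]
  | cons c t ih =>
    have h1 : (c :: t).reverse = t.reverse ++ [c] := by simp
    rw [h1, sufs_append]
    have h2 : sufs [c] (t.reverse.reverse ++ []) = [String.ofList (c :: t)] := by simp [sufs]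
    rw [h2]
    have h3 : (List.range (c :: t).length).map (fun i => String.ofList ((c :: t).drop i))
        = String.ofList (c :: t) :: (List.range t.length).map (fun i => String.ofList (t.drop i)) := by
      simp [List.range_succ_eq_map, List.map_map, Function.comp]
    rw [h3]
    exact (List.perm_append_singleton _ _).trans (List.Perm.cons _ ih)

-- A's loop: after folding any index list r, answer holds the suffixes
-- cur.drop 0, …, cur.drop (r.length - 1) in order of decreasing length.
lemma Aloop (r : List Int) : ∀ (acc : List String) (cur : List Char),
    r.foldl (fun (s : List String × List Char) _ =>
        (s.1 ++ [String.ofList s.2], ((PySem.List.pop? s.2 0).map (·.2)).getD [])) (acc, cur)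
      = (acc ++ (List.range r.length).map (fun i => String.ofList (cur.drop i)), cur.drop r.length) := by
  induction r with
  | nil => simp
  | cons x r ih =>
    intro acc cur
    simp only [List.foldl_cons]
    have htail : ((PySem.List.pop? cur 0).map (·.2)).getD [] = cur.tail := by
      cases cur with
      | nil => rfl
      | cons a as => simp [PySem.List.pop?_zero_cons]
    rw [htail, ih, Prod.mk.injEq]
    refine ⟨?_, ?_⟩
    · rw [List.length_cons, List.range_succ_eq_map]
      simp [List.map_map, Function.comp, List.append_assoc, List.drop_tail]
    · rw [List.length_cons, List.drop_tail]

-- ===== VERDICT (by name: the statement is the Claim_ definition above) =====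
theorem solution_spec : Claim_equal_solution := by
  intro ms _
  unfold Spec_solution solution solution_alt
  have hlen : (PySem.List.pyRange 0 (PySem.List.len ms.toList) 1).length = ms.toList.length := by
    simp [PySem.List.length_pyRange_one]
  obtain ⟨hp, hs⟩ := Bloop ms.toList.reverse [] [] List.Pairwise.nil
  rw [Aloop]
  simp only [List.nil_append, hlen]
  exact PySem.List.sorted_id_eq_of_perm_of_pairwise _ _
    (hp.trans (by simpa using sufs_rev_perm ms.toList)) hs
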